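-- pv_equiv track=rewrite | github.com/Heggeg/remote_homeassistant | custom_components/remote_homeassistant/config_flow.py | _organize_services
-- ===== SOURCE A (Python) =====
-- def _organize_services(services: list[str]) -> list[str]:
--     """Organize services by domain for better display."""
--     # Group by domain
--     domain_services = {}
--     for service in services:
--         if "." in service:
--             domain, svc = service.split(".", 1)
--             if domain not in domain_services:
--                 domain_services[domain] = []
--             domain_services[domain].append(service)
--         else:
--             if "other" not in domain_services:
--                 domain_services["other"] = []
--             domain_services["other"].append(service)
--
--     # Sort by domain and services within domain
--     result = []
--     for domain in sorted(domain_services.keys()):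
--         result.extend(sorted(domain_services[domain]))
--
--     return result
-- ===== SOURCE B (Python) =====
-- def _organize_services(services: list[str]) -> list[str]:
--     """Organize services by domain for better display."""
--     def key(s):
--         return (s.split(".", 1)[0] if "." in s else "other", s)
--     return sorted(services, key=key)
-- ===== Notes on version B (the rewrite author's own statement) =====
-- stated objective: simpler
-- what changed: Replaces the grouping dict plus per-domain sorting passes with a single stable sort keyed by (domain-or-'other', full name).
import Mathlib
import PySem

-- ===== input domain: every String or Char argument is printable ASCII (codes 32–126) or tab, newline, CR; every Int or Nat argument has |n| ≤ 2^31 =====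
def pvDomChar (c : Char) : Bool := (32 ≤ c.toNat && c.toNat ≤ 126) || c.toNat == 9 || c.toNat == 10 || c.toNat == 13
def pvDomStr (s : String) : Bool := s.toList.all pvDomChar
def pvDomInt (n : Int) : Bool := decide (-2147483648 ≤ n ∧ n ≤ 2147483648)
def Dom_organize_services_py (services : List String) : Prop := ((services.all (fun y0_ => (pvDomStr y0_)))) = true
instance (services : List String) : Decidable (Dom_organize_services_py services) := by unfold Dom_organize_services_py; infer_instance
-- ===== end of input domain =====

-- B replaces A's grouping dict plus per-domain sorts by ONE stable sort keyed by (domain-or-'other', full name); equal results, similar cost ('simpler').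

-- ===== PORT A =====
def organize_services_py (services : List String) : List String :=
  let domain_services : PySem.Dict String (List String) :=
    services.foldl (fun d service =>
      if PySem.Str.isIn "." service then
        match PySem.Str.splitMax? service "." 1 with
        | some [domain, _svc] => d.modify domain [] (· ++ [service])
        | _ => d          -- unreachable: split(".", 1) with "." present yields exactly two parts
      else
        d.modify "other" [] (· ++ [service])) PySem.Dict.empty
  (PySem.List.sorted domain_services.keys (fun x => x)).foldl
    (fun result domain => result ++ PySem.List.sorted (domain_services.getD domain []) (fun x => x)) []

-- ===== PORT B =====
-- Source B's key function: (s.split(".", 1)[0] if "." in s else "other", s); split(".",1) is never empty, so [0] is its head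
def pvKey1 (s : String) : String :=
  if PySem.Str.isIn "." s then ((PySem.Str.splitMax? s "." 1).getD []).headD "" else "other"

def organize_services_py_alt (services : List String) : List String :=
  PySem.List.sorted2 services pvKey1 (fun s => s)

-- ===== PRECONDITION & SPEC =====
def Spec_organize_services_py (services : List String) (out : List String) : Prop := out = organize_services_py_alt services
instance (services : List String) (out : List String) : Decidable (Spec_organize_services_py services out) := by unfold Spec_organize_services_py; infer_instance

-- ===== CLAIM (what is proved, stated in full; the proofs are below) =====
def Claim_equal_organize_services_py : Prop := ∀ (services : List String), Dom_organize_services_py services → Spec_organize_services_py services (organize_services_py services)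

-- ===== LEMMAS AND PROOFS =====

-- the total order both outputs are sorted by: by domain key, then by the full string
def pvR (a b : String) : Prop := pvKey1 a < pvKey1 b ∨ (pvKey1 a = pvKey1 b ∧ a ≤ b)

-- A's grouping dict, named so the proofs can talk about it (defeq to the dict A builds)
def pvDictOf (services : List String) : PySem.Dict String (List String) :=
  services.foldl (fun d service =>
    if PySem.Str.isIn "." service then
      match PySem.Str.splitMax? service "." 1 with
      | some [domain, _svc] => d.modify domain [] (· ++ [service])
      | _ => d
    else
      d.modify "other" [] (· ++ [service])) PySem.Dict.empty

theorem pvR_trans (a b c : String) : pvR a b → pvR b c → pvR a c := by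
  unfold pvR
  rintro (h1 | ⟨h1, h1'⟩) (h2 | ⟨h2, h2'⟩)
  · exact Or.inl (lt_trans h1 h2)
  · exact Or.inl (h2 ▸ h1)
  · exact Or.inl (h1 ▸ h2)
  · exact Or.inr ⟨h1.trans h2, le_trans h1' h2'⟩

theorem pvR_antisymm (a b : String) : pvR a b → pvR b a → a = b := by
  unfold pvR
  rintro (h1 | ⟨h1, h1'⟩) (h2 | ⟨h2, h2'⟩)
  · exact absurd h2 (not_lt_of_gt h1)
  · exact absurd h1 (h2 ▸ lt_irrefl _)
  · exact absurd h2 (h1 ▸ lt_irrefl _)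
  · exact le_antisymm h1' h2'

-- go with maxsplit exhausted returns the rest as the final piece
theorem pv_go_zero (sep : List Char) (fuel : Nat) (l cur : List Char) (acc : List (List Char)) :
    PySem.Chars.splitOnMax.go sep fuel 0 l cur acc = ((cur.reverse ++ l) :: acc).reverse := by
  cases fuel <;> cases l <;> simp [PySem.Chars.splitOnMax.go]

-- shape of split(".", 1) when a dot is present: exactly two pieces
theorem pv_go_shape (fuel : Nat) : ∀ (l cur : List Char), l.length < fuel → '.' ∈ l →
    ∃ a b, PySem.Chars.splitOnMax.go ['.'] fuel 1 l cur [] = [a, b] := by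
  induction fuel with
  | zero => intro l cur h _; omega
  | succ n ih =>
    intro l cur hlen hmem
    cases l with
    | nil => simp at hmem
    | cons c rest =>
      by_cases hc : c = '.'
      · refine ⟨cur.reverse, rest, ?_⟩
        simp [PySem.Chars.splitOnMax.go, List.isPrefixOf, hc, pv_go_zero]
      · have hmem' : '.' ∈ rest := by
          rcases List.mem_cons.mp hmem with h | h
          · exact absurd h.symm hc
          · exact h
        obtain ⟨a, b, hab⟩ := ih rest (c :: cur) (by simp at hlen ⊢; omega) hmem'
        refine ⟨a, b, ?_⟩
        simp [PySem.Chars.splitOnMax.go, List.isPrefixOf, Ne.symm hc, hab]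

theorem pv_split_shape (s : String) (h : PySem.Str.isIn "." s = true) :
    ∃ a b, PySem.Str.splitMax? s "." 1 = some [a, b] := by
  have hmem : '.' ∈ s.toList := by
    have := (PySem.Str.isIn_iff_infix "." s).mp h
    simpa using this.subset (by simp)
  obtain ⟨a, b, hab⟩ := pv_go_shape (s.toList.length + 1) s.toList [] (by omega) hmem
  have hc : PySem.Chars.splitOnMax s.toList ['.'] 1 = [a, b] := by
    unfold PySem.Chars.splitOnMax
    rw [if_neg (by norm_num)]
    exact hab
  refine ⟨String.ofList a, String.ofList b, ?_⟩
  unfold PySem.Str.splitMax? PySem.Chars.splitMax?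
  rw [if_neg (by decide)]
  simp only [Option.map_some]
  rw [show (".".toList : List Char) = ['.'] from rfl, hc]
  rfl

-- A's grouping step is exactly "append s to bucket pvKey1 s"
theorem pv_stepA_eq (services : List String) :
    pvDictOf services = services.foldl (fun d s => d.modify (pvKey1 s) [] (· ++ [s])) PySem.Dict.empty := by
  unfold pvDictOf
  congr 1
  funext d s
  unfold pvKey1
  by_cases h : PySem.Str.isIn "." s = true
  · obtain ⟨a, b, hab⟩ := pv_split_shape s h
    rw [if_pos h, if_pos h, hab]
    rfl
  · rw [if_neg h, if_neg h]

-- A rewritten: concatenate, over the sorted distinct keys, the sorted buckets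
theorem pv_A_eq (services : List String) :
    organize_services_py services =
      (PySem.List.sorted (PySem.Set.ofList (services.map pvKey1)) (fun x => x)).flatMap
        (fun c => PySem.List.sorted (services.filter (fun s => pvKey1 s == c)) (fun x => x)) := by
  have hA : organize_services_py services
      = (PySem.List.sorted (pvDictOf services).keys (fun x => x)).foldl
          (fun result domain => result ++ PySem.List.sorted ((pvDictOf services).getD domain []) (fun x => x)) [] := rfl
  rw [hA, pv_stepA_eq]
  have hkeys : (services.foldl (fun d s => d.modify (pvKey1 s) [] (· ++ [s])) PySem.Dict.empty).keys
      = PySem.Set.ofList (services.map pvKey1) := by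
    rw [PySem.Dict.keys_foldl_modify_key services pvKey1 [] (fun _ s => (· ++ [s]))]
    simp [PySem.Set.update, PySem.Set.ofList]
  have hgetD : ∀ c, (services.foldl (fun d s => d.modify (pvKey1 s) [] (· ++ [s])) PySem.Dict.empty).getD c []
      = services.filter (fun s => pvKey1 s == c) := by
    intro c
    have h := PySem.Dict.getD_foldl_modify_append (services.map (fun s => (pvKey1 s, s))) PySem.Dict.empty c
    rw [List.foldl_map] at h
    simp only [List.filter_map, List.map_map, Function.comp_def] at h
    simpa using h
  rw [hkeys, PySem.List.foldl_append_eq_flatMap]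
  simp only [hgetD, List.nil_append]

-- bucket concatenation over distinct covering keys is a permutation of the original list
theorem pv_flatMap_perm : ∀ (D l : List String), D.Nodup → (∀ s ∈ l, pvKey1 s ∈ D) →
    (D.flatMap (fun c => PySem.List.sorted (l.filter (fun s => pvKey1 s == c)) (fun x => x))).Perm l := by
  intro D
  induction D with
  | nil =>
    intro l _ hcov
    have : l = [] := List.eq_nil_iff_forall_not_mem.mpr (fun s hs => by simpa using hcov s hs)
    simp [this]
  | cons c D' ih =>
    intro l hnd hcov
    have hcnotin : c ∉ D' := (List.nodup_cons.mp hnd).1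
    have hstep : ∀ c' ∈ D', l.filter (fun s => pvKey1 s == c')
        = (l.filter (fun s => !(pvKey1 s == c))).filter (fun s => pvKey1 s == c') := by
      intro c' hc'
      rw [List.filter_filter]
      apply List.filter_congr
      intro s _
      cases hb : (pvKey1 s == c') with
      | false => simp
      | true =>
        have hksc : pvKey1 s = c' := by simpa using hb
        have hne : c' ≠ c := fun hh => hcnotin (hh ▸ hc')
        simp [hksc, hne]
    have hrw : D'.flatMap (fun c' => PySem.List.sorted (l.filter (fun s => pvKey1 s == c')) (fun x => x))
        = D'.flatMap (fun c' => PySem.List.sorted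
            ((l.filter (fun s => !(pvKey1 s == c))).filter (fun s => pvKey1 s == c')) (fun x => x)) :=
      List.flatMap_congr (fun c' hc' => by rw [hstep c' hc'])
    have ihp := ih (l.filter (fun s => !(pvKey1 s == c))) (List.nodup_cons.mp hnd).2
      (by
        intro s hs
        rw [List.mem_filter] at hs
        rcases List.mem_cons.mp (hcov s hs.1) with h | h
        · exact absurd h (by simpa using hs.2)
        · exact h)
    rw [List.flatMap_cons, hrw]
    exact ((PySem.List.sorted_perm _ _ _).append ihp).trans (List.filter_append_perm _ l)

theorem pv_A_perm (services : List String) : (organize_services_py services).Perm services := by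
  rw [pv_A_eq]
  apply pv_flatMap_perm
  · exact ((PySem.List.sorted_perm _ _ _).symm.nodup (PySem.Set.nodup_ofList _))
  · intro s hs
    rw [PySem.List.mem_sorted, PySem.Set.mem_ofList]
    exact List.mem_map_of_mem hs

theorem pv_A_pairwise (services : List String) : (organize_services_py services).Pairwise pvR := by
  rw [pv_A_eq, List.pairwise_flatMap]
  constructor
  · intro c _
    have hp := PySem.List.sorted_pairwise (services.filter (fun s => pvKey1 s == c)) (fun x => x)
    refine hp.imp_of_mem ?_
    intro a b ha hb hle
    have hka : pvKey1 a = c := by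
      have := (PySem.List.mem_sorted _ _ _ _).mp ha
      simpa using (List.mem_filter.mp this).2
    have hkb : pvKey1 b = c := by
      have := (PySem.List.mem_sorted _ _ _ _).mp hb
      simpa using (List.mem_filter.mp this).2
    exact Or.inr ⟨hka.trans hkb.symm, hle⟩
  · have hlt := PySem.List.sorted_ofList_pairwise_lt (services.map pvKey1)
    refine hlt.imp_of_mem ?_
    intro c₁ c₂ _ _ hlt' x hx y hy
    have hkx : pvKey1 x = c₁ := by
      have := (PySem.List.mem_sorted _ _ _ _).mp hx
      simpa using (List.mem_filter.mp this).2
    have hky : pvKey1 y = c₂ := by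
      have := (PySem.List.mem_sorted _ _ _ _).mp hy
      simpa using (List.mem_filter.mp this).2
    exact Or.inl (hkx ▸ hky ▸ hlt')

-- insertion with a comparator total for the order preserves Pairwise of that order
theorem pv_insertBy_pairwise {α : Type} (r : α → α → Prop) (before : α → α → Bool)
    (h1 : ∀ a b, before a b = true → r a b) (h2 : ∀ a b, before a b = false → r b a)
    (ht : ∀ a b c, r a b → r b c → r a c)
    (x : α) (ys : List α) (hp : ys.Pairwise r) :
    (PySem.List.insertBy before x ys).Pairwise r := by
  induction ys with
  | nil => simp [PySem.List.insertBy]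
  | cons y ys ih =>
    rw [List.pairwise_cons] at hp
    by_cases h : before x y = true
    · simp only [PySem.List.insertBy, h, if_true]
      rw [List.pairwise_cons]
      refine ⟨?_, List.pairwise_cons.mpr hp⟩
      intro z hz
      rcases List.mem_cons.mp hz with rfl | hz'
      · exact h1 x z h
      · exact ht x y z (h1 x y h) (hp.1 z hz')
    · have hb : before x y = false := by simpa using h
      simp only [PySem.List.insertBy, hb, Bool.false_eq_true, if_false]
      rw [List.pairwise_cons]
      refine ⟨?_, ih hp.2⟩
      intro z hz
      rcases (PySem.List.mem_insertBy before x z ys).mp hz with rfl | hz'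
      · exact h2 z y hb
      · exact hp.1 z hz'

theorem pv_foldl_insertBy_pairwise {α : Type} (r : α → α → Prop) (before : α → α → Bool)
    (h1 : ∀ a b, before a b = true → r a b) (h2 : ∀ a b, before a b = false → r b a)
    (ht : ∀ a b c, r a b → r b c → r a c) :
    ∀ (xs acc : List α), acc.Pairwise r →
      (xs.foldl (fun acc x => PySem.List.insertBy before x acc) acc).Pairwise r := by
  intro xs
  induction xs with
  | nil => intro acc h; simpa using h
  | cons x xs ih =>
    intro acc hacc
    exact ih _ (pv_insertBy_pairwise r before h1 h2 ht x acc hacc)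

theorem pv_B_pairwise (services : List String) : (organize_services_py_alt services).Pairwise pvR := by
  have hB : organize_services_py_alt services
      = services.foldl (fun acc x => PySem.List.insertBy
          (fun a b => decide (pvKey1 a < pvKey1 b) || (!decide (pvKey1 b < pvKey1 a) && decide (a < b)))
          x acc) [] := rfl
  rw [hB]
  apply pv_foldl_insertBy_pairwise pvR _ ?_ ?_ pvR_trans services [] List.Pairwise.nil
  · intro a b hb
    simp only [Bool.or_eq_true, Bool.and_eq_true, Bool.not_eq_true', decide_eq_true_eq,
      decide_eq_false_iff_not, not_lt] at hb
    rcases hb with h | ⟨hle, hlt⟩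
    · exact Or.inl h
    · rcases lt_or_eq_of_le hle with h' | h'
      · exact Or.inl h'
      · exact Or.inr ⟨h', le_of_lt hlt⟩
  · intro a b hb
    simp only [Bool.or_eq_false_iff, Bool.and_eq_false_iff, Bool.not_eq_false',
      decide_eq_true_eq, decide_eq_false_iff_not, not_lt] at hb
    obtain ⟨hle, h2⟩ := hb
    rcases h2 with h2 | h2
    · exact Or.inl h2
    · rcases lt_or_eq_of_le hle with h' | h'
      · exact Or.inl h'
      · exact Or.inr ⟨h', h2⟩

-- ===== VERDICT (by name: the statement is the Claim_ definition above) =====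
theorem organize_services_py_spec : Claim_equal_organize_services_py := by
  intro services _
  unfold Spec_organize_services_py
  have hperm : (organize_services_py services).Perm (organize_services_py_alt services) :=
    (pv_A_perm services).trans (PySem.List.sorted2_perm services pvKey1 (fun s => s) false).symm
  exact List.Perm.eq_of_pairwise
    (fun a b _ _ hab hba => pvR_antisymm a b hab hba)
    (pv_A_pairwise services) (pv_B_pairwise services) hperm
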